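-- pv_equiv track=rewrite | github.com/lvreynoso/hackerrank | euler201/esum.py | eulerSum
-- ===== SOURCE A (Python) =====
-- import itertools
--
-- def eulerSum(inputSet, setLength, subsetSize):
--     setA = inputSet
--     permutations = tuple(itertools.combinations(inputSet, subsetSize))
--     counts = {}
--     for entry in permutations:
--         thisSum = sum(entry)
--         if thisSum not in counts:
--             counts[thisSum] = 1
--         else:
--             counts[thisSum] += 1
--
--     uniqueSums = [n[0] for n in counts.items() if n[1] == 1]
--     result = sum(uniqueSums)
--     return result
-- ===== SOURCE B (Python) =====
-- def eulerSum(inputSet, setLength, subsetSize):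
--     # DP over (subset size, subset sum) counting the number of size-j
--     # combinations reaching each sum, instead of enumerating all combinations.
--     if subsetSize > len(inputSet):
--         return 0
--     dp = [dict() for _ in range(subsetSize + 1)]
--     dp[0][0] = 1
--     for x in inputSet:
--         for j in range(subsetSize - 1, -1, -1):
--             nxt = dp[j + 1]
--             for s, w in dp[j].items():
--                 nxt[s + x] = nxt.get(s + x, 0) + w
--     return sum(s for s, w in dp[subsetSize].items() if w == 1)
-- ===== Notes on version B (the rewrite author's own statement) =====
-- stated objective: alternative
-- what changed: Replaces enumeration of all C(n,k) combinations with a knapsack-style DP over (subset size, sum) dictionaries that counts how many size-j combinations reach each sum, then sums the sums reached exactly once.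
import Mathlib
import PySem

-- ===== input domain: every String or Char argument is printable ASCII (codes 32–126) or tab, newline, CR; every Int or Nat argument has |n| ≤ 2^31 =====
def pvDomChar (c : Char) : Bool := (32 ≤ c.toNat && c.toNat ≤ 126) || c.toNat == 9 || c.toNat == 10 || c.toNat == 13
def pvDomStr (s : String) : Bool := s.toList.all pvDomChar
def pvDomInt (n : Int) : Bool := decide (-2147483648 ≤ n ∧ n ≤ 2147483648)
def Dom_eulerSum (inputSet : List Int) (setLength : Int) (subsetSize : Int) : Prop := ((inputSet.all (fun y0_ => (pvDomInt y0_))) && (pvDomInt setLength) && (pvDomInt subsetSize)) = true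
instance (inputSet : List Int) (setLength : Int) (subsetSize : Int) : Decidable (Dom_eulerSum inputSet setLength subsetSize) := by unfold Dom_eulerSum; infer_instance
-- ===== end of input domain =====

-- B replaces A's enumeration of all C(n,k) combinations by a knapsack-style DP over
-- (subset size, sum) dictionaries; the RETURN value is proved equal on Pre_.

-- ===== PORT A =====
def eulerSum (inputSet : List Int) (setLength : Int) (subsetSize : Int) : Int :=
  let permutations := PySem.List.combinations inputSet subsetSize.toNat
  let counts := permutations.foldl (fun d entry =>
      let thisSum := entry.sum
      if d.contains thisSum = false then d.insert thisSum 1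
      else d.insert thisSum (d.getD thisSum 0 + 1)) (PySem.Dict.empty : PySem.Dict Int Int)
  let uniqueSums := counts.items.foldl (fun acc n => if n.2 == 1 then acc ++ [n.1] else acc) ([] : List Int)
  uniqueSums.sum

-- ===== PORT B =====
-- inner loop: 'for s, w in dp[j].items(): nxt[s + x] = nxt.get(s + x, 0) + w'
def dpMerge (x : Int) (dst : PySem.Dict Int Int) (items : List (Int × Int)) : PySem.Dict Int Int :=
  items.foldl (fun nxt p => nxt.insert (p.1 + x) (nxt.getD (p.1 + x) 0 + p.2)) dst

-- one element x: 'for j in range(subsetSize - 1, -1, -1): …' (descending indices k-1 … 0)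
def dpStep (k : Nat) (dp : Array (PySem.Dict Int Int)) (x : Int) : Array (PySem.Dict Int Int) :=
  ((List.range k).reverse).foldl (fun dp j =>
    dp.setIfInBounds (j + 1) (dpMerge x (dp.getD (j + 1) PySem.Dict.empty) ((dp.getD j PySem.Dict.empty).items))) dp

def eulerSum_alt (inputSet : List Int) (setLength : Int) (subsetSize : Int) : Int :=
  if (inputSet.length : Int) < subsetSize then 0
  else
  let k := subsetSize.toNat
  let dp0 := (Array.replicate (k + 1) (PySem.Dict.empty : PySem.Dict Int Int)).setIfInBounds 0 (PySem.Dict.empty.insert 0 1)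
  let dp := inputSet.foldl (dpStep k) dp0
  (dp.getD k PySem.Dict.empty).items.foldl (fun acc p => if p.2 == 1 then acc + p.1 else acc) 0

-- ===== PRECONDITION & SPEC =====
-- Pre_ excludes negative subsetSize: there Python A raises ValueError (itertools.combinations) and Python B raises IndexError.
def Pre_eulerSum (inputSet : List Int) (setLength : Int) (subsetSize : Int) : Prop := 0 ≤ subsetSize
instance (inputSet : List Int) (setLength : Int) (subsetSize : Int) : Decidable (Pre_eulerSum inputSet setLength subsetSize) := by unfold Pre_eulerSum; infer_instance
def pvWitness_eulerSum : List Int × Int × Int := ([1, 2, 3, 4], 4, 2)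

def Spec_eulerSum (inputSet : List Int) (setLength : Int) (subsetSize : Int) (out : Int) : Prop := out = eulerSum_alt inputSet setLength subsetSize
instance (inputSet : List Int) (setLength : Int) (subsetSize : Int) (out : Int) : Decidable (Spec_eulerSum inputSet setLength subsetSize out) := by unfold Spec_eulerSum; infer_instance

-- ===== CLAIM (what is proved, stated in full; the proofs are below) =====
def Claim_equal_eulerSum : Prop := ∀ (inputSet : List Int) (setLength : Int) (subsetSize : Int), Dom_eulerSum inputSet setLength subsetSize → Pre_eulerSum inputSet setLength subsetSize → Spec_eulerSum inputSet setLength subsetSize (eulerSum inputSet setLength subsetSize)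

-- ===== LEMMAS AND PROOFS =====

-- number of size-j combinations of l whose sum is s
def cnt (l : List Int) (j : Nat) (s : Int) : Nat :=
  (PySem.List.combinations l j).countP (fun c => c.sum == s)

theorem cnt_zero (l : List Int) (s : Int) : cnt l 0 s = if (0 : Int) = s then 1 else 0 := by
  simp [cnt, PySem.List.combinations_zero, List.countP_cons]

theorem cnt_nil_succ (j : Nat) (s : Int) : cnt [] (j + 1) s = 0 := by
  simp [cnt, PySem.List.combinations_nil_succ]

theorem cnt_cons_succ (a : Int) (l : List Int) (j : Nat) (s : Int) :
    cnt (a :: l) (j + 1) s = cnt l j (s - a) + cnt l (j + 1) s := by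
  simp only [cnt, PySem.List.combinations_cons_succ, List.countP_append, List.countP_map]
  congr 1
  apply List.countP_congr
  intro c _
  simp only [Function.comp_apply, List.sum_cons, beq_iff_eq]
  constructor <;> intro h <;> omega

theorem cnt_append_singleton (l : List Int) (x : Int) (j : Nat) (s : Int) :
    cnt (l ++ [x]) (j + 1) s = cnt l (j + 1) s + cnt l j (s - x) := by
  induction l generalizing j s with
  | nil =>
    cases j with
    | zero =>
      simp only [List.nil_append, cnt_cons_succ, cnt_nil_succ, cnt_zero]
      split_ifs <;> omega
    | succ j => simp [cnt_cons_succ, cnt_nil_succ]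
  | cons a l ih =>
    have h1 : (a :: l) ++ [x] = a :: (l ++ [x]) := rfl
    cases j with
    | zero =>
      rw [h1, cnt_cons_succ, ih, cnt_cons_succ]
      simp only [cnt_zero]
      split_ifs <;> omega
    | succ j =>
      rw [h1, cnt_cons_succ, ih, ih, cnt_cons_succ, cnt_cons_succ]
      rw [show s - a - x = s - x - a by ring]
      omega

theorem dpMerge_getD (x t : Int) (l : List (Int × Int)) (dst : PySem.Dict Int Int) :
    (dpMerge x dst l).getD t 0 = dst.getD t 0 + ((l.filter (fun p => p.1 + x == t)).map (·.2)).sum := by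
  induction l generalizing dst with
  | nil => simp [dpMerge]
  | cons p l ih =>
    simp only [dpMerge, List.foldl_cons] at *
    rw [ih, List.filter_cons]
    by_cases h : p.1 + x = t
    · simp [h]
      ring
    · have h' : t ≠ p.1 + x := fun hh => h hh.symm
      simp [h, h', PySem.Dict.getD_insert]

theorem dpMerge_mem_keys (x t : Int) (l : List (Int × Int)) (dst : PySem.Dict Int Int) :
    t ∈ (dpMerge x dst l).keys ↔ t ∈ dst.keys ∨ ∃ p ∈ l, p.1 + x = t := by
  induction l generalizing dst with
  | nil => simp [dpMerge]
  | cons p l ih =>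
    simp only [dpMerge, List.foldl_cons] at *
    rw [ih]
    simp only [PySem.Dict.mem_keys_insert, List.mem_cons]
    constructor
    · rintro (h | h)
      · rcases h with h | h
        · exact Or.inr ⟨p, Or.inl rfl, h.symm⟩
        · exact Or.inl h
      · rcases h with ⟨q, hq, hqt⟩; exact Or.inr ⟨q, Or.inr hq, hqt⟩
    · rintro (h | ⟨q, hq | hq, hqt⟩)
      · exact Or.inl (Or.inr h)
      · subst hq; exact Or.inl (Or.inl hqt.symm)
      · exact Or.inr ⟨q, hq, hqt⟩

theorem dpMerge_nodup_keys (x : Int) (l : List (Int × Int)) (dst : PySem.Dict Int Int)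
    (h : dst.keys.Nodup) : (dpMerge x dst l).keys.Nodup :=
  PySem.Dict.nodup_keys_foldl_insert_key l (fun p => p.1 + x)
    (fun nxt p => nxt.getD (p.1 + x) 0 + p.2) dst h

theorem dpMerge_src_getD (x t : Int) (src dst : PySem.Dict Int Int) (hnd : src.keys.Nodup) :
    (dpMerge x dst src.items).getD t 0 = dst.getD t 0 + src.getD (t - x) 0 := by
  rw [dpMerge_getD]
  congr 1
  have hp : ∀ s ∈ src.keys, ((fun p : Int × Int => p.1 + x == t) ∘ (fun k => (k, src.getD k 0))) s = (s == t - x) := by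
    intro s _
    simp only [Function.comp_apply]
    rw [Bool.eq_iff_iff]
    simp only [beq_iff_eq]
    omega
  rw [PySem.Dict.items_eq_map_keys src hnd 0, List.filter_map, List.map_map,
    List.filter_congr hp, List.filter_beq]
  by_cases hm : (t - x) ∈ src.keys
  · rw [List.count_eq_one_of_mem hnd hm]
    simp
  · rw [List.count_eq_zero_of_not_mem hm]
    have hc : src.contains (t - x) = false := by
      rw [Bool.eq_false_iff, Ne, PySem.Dict.contains_iff_mem_keys]
      exact hm
    simp [PySem.Dict.getD_of_not_contains src 0 hc]

theorem dpMerge_src_mem_keys (x t : Int) (src dst : PySem.Dict Int Int) :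
    t ∈ (dpMerge x dst src.items).keys ↔ t ∈ dst.keys ∨ (t - x) ∈ src.keys := by
  rw [dpMerge_mem_keys]
  constructor
  · rintro (h | ⟨p, hp, hpt⟩)
    · exact Or.inl h
    · refine Or.inr ?_
      have h1 : p.1 = t - x := by omega
      have hk : p.1 ∈ src.keys := PySem.Dict.mem_keys_of_mem_items src hp
      rwa [h1] at hk
  · rintro (h | h)
    · exact Or.inl h
    · refine Or.inr ?_
      simp only [PySem.Dict.keys, List.mem_map] at h
      rcases h with ⟨p, hp, hpk⟩
      exact ⟨p, hp, by omega⟩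

-- list indexing helpers
theorem getD_set_ne {α : Type} (l : List α) (i j : Nat) (v d : α) (h : i ≠ j) :
    (l.set i v).getD j d = l.getD j d := by
  simp [List.getD_eq_getElem?_getD, List.getElem?_set_ne h]

theorem getD_set_self {α : Type} (l : List α) (i : Nat) (v d : α) (h : i < l.length) :
    (l.set i v).getD i d = v := by
  simp [List.getD_eq_getElem?_getD, h]

theorem agetD_eq_toList {α : Type} (a : Array α) (i : Nat) (d : α) :
    a.getD i d = a.toList.getD i d := by
  simp [Array.getD, List.getD_eq_getElem?_getD]
  split <;> simp_all

theorem agetD_set_ne {α : Type} (a : Array α) (i j : Nat) (v d : α) (h : i ≠ j) :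
    (a.setIfInBounds i v).getD j d = a.getD j d := by
  rw [agetD_eq_toList, Array.toList_setIfInBounds, getD_set_ne _ _ _ _ _ h, ← agetD_eq_toList]

theorem agetD_set_self {α : Type} (a : Array α) (i : Nat) (v d : α) (h : i < a.size) :
    (a.setIfInBounds i v).getD i d = v := by
  rw [agetD_eq_toList, Array.toList_setIfInBounds, getD_set_self]
  rwa [Array.length_toList]

-- the descending inner loop, characterised index by index
theorem foldRange_getD (x : Int) (m : Nat) (dp : Array (PySem.Dict Int Int)) (hm : m < dp.size) (i : Nat) :
    (((List.range m).reverse).foldl (fun dp j =>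
        dp.setIfInBounds (j + 1) (dpMerge x (dp.getD (j + 1) PySem.Dict.empty) ((dp.getD j PySem.Dict.empty).items))) dp).getD i PySem.Dict.empty
      = if 1 ≤ i ∧ i ≤ m then dpMerge x (dp.getD i PySem.Dict.empty) ((dp.getD (i - 1) PySem.Dict.empty).items)
        else dp.getD i PySem.Dict.empty := by
  induction m generalizing dp with
  | zero =>
    simp only [List.range_zero, List.reverse_nil, List.foldl_nil]
    rw [if_neg (by omega)]
  | succ m ih =>
    rw [List.range_succ, List.reverse_append, List.reverse_singleton, List.singleton_append, List.foldl_cons]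
    have hm' : m < (dp.setIfInBounds (m + 1) (dpMerge x (dp.getD (m + 1) PySem.Dict.empty) ((dp.getD m PySem.Dict.empty).items))).size := by
      rw [Array.size_setIfInBounds]; omega
    rw [ih _ hm']
    by_cases h1 : 1 ≤ i ∧ i ≤ m
    · rw [if_pos h1, if_pos ⟨h1.1, by omega⟩]
      rw [agetD_set_ne dp (m + 1) i _ _ (by omega), agetD_set_ne dp (m + 1) (i - 1) _ _ (by omega)]
    · rw [if_neg h1]
      by_cases h2 : i = m + 1
      · subst h2
        rw [if_pos ⟨by omega, by omega⟩]
        rw [agetD_set_self dp (m + 1) _ _ (by omega)]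
        simp
      · rw [if_neg (by omega)]
        rw [agetD_set_ne dp (m + 1) i _ _ (by omega)]

theorem foldRange_size (x : Int) (m : Nat) (dp : Array (PySem.Dict Int Int)) :
    (((List.range m).reverse).foldl (fun dp j =>
        dp.setIfInBounds (j + 1) (dpMerge x (dp.getD (j + 1) PySem.Dict.empty) ((dp.getD j PySem.Dict.empty).items))) dp).size = dp.size := by
  induction m generalizing dp with
  | zero => simp
  | succ m ih =>
    rw [List.range_succ, List.reverse_append, List.reverse_singleton, List.singleton_append,
      List.foldl_cons, ih, Array.size_setIfInBounds]

-- the DP invariant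
def DPInv (k : Nat) (p : List Int) (dp : Array (PySem.Dict Int Int)) : Prop :=
  dp.size = k + 1 ∧ ∀ j, j ≤ k →
    ((dp.getD j PySem.Dict.empty).keys.Nodup ∧
     (∀ s, (dp.getD j PySem.Dict.empty).getD s 0 = (cnt p j s : Int)) ∧
     (∀ s, s ∈ (dp.getD j PySem.Dict.empty).keys ↔ cnt p j s ≠ 0))

theorem DPInv_step (k : Nat) (p : List Int) (dp : Array (PySem.Dict Int Int)) (x : Int)
    (h : DPInv k p dp) : DPInv k (p ++ [x]) (dpStep k dp x) := by
  obtain ⟨hlen, hj⟩ := h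
  have hm : k < dp.size := by omega
  constructor
  · rw [dpStep, foldRange_size]; exact hlen
  · intro j hjk
    rw [dpStep, foldRange_getD x k dp hm j]
    by_cases h1 : 1 ≤ j ∧ j ≤ k
    · rw [if_pos h1]
      obtain ⟨j', rfl⟩ : ∃ j', j = j' + 1 := ⟨j - 1, by omega⟩
      simp only [Nat.add_sub_cancel]
      obtain ⟨hnd1, hgd1, hmem1⟩ := hj (j' + 1) hjk
      obtain ⟨hnd0, hgd0, hmem0⟩ := hj j' (by omega)
      refine ⟨dpMerge_nodup_keys _ _ _ hnd1, ?_, ?_⟩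
      · intro s
        rw [dpMerge_src_getD _ _ _ _ hnd0, hgd1 s, hgd0 (s - x), cnt_append_singleton]
        push_cast
        ring
      · intro s
        rw [dpMerge_src_mem_keys, hmem1 s, hmem0 (s - x), cnt_append_singleton]
        omega
    · rw [if_neg h1]
      have hj0 : j = 0 := by omega
      subst hj0
      obtain ⟨hnd, hgd, hmem⟩ := hj 0 (by omega)
      refine ⟨hnd, ?_, ?_⟩
      · intro s; rw [hgd s, cnt_zero, cnt_zero]
      · intro s; rw [hmem s, cnt_zero, cnt_zero]

theorem DPInv_foldl (k : Nat) (l : List Int) (p : List Int) (dp : Array (PySem.Dict Int Int))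
    (h : DPInv k p dp) : DPInv k (p ++ l) (l.foldl (dpStep k) dp) := by
  induction l generalizing p dp with
  | nil => simpa using h
  | cons x l ih =>
    rw [List.foldl_cons, List.append_cons]
    exact ih (p ++ [x]) (dpStep k dp x) (DPInv_step k p dp x h)

theorem DPInv_init (k : Nat) :
    DPInv k [] ((Array.replicate (k + 1) (PySem.Dict.empty : PySem.Dict Int Int)).setIfInBounds 0 (PySem.Dict.empty.insert 0 1)) := by
  constructor
  · rw [Array.size_setIfInBounds, Array.size_replicate]
  · intro j hjk
    cases j with
    | zero =>
      rw [agetD_set_self _ _ _ _ (by simp)]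
      refine ⟨by decide, ?_, ?_⟩
      · intro s
        rw [cnt_zero, PySem.Dict.getD_insert]
        by_cases h : s = 0 <;> simp [h, eq_comm, PySem.Dict.getD_empty]
      · intro s
        rw [PySem.Dict.mem_keys_insert, cnt_zero]
        by_cases h : s = 0 <;> simp [h, eq_comm, PySem.Dict.keys_empty]
    | succ j =>
      rw [agetD_set_ne _ _ _ _ _ (by omega)]
      have hrep : (Array.replicate (k + 1) (PySem.Dict.empty : PySem.Dict Int Int)).getD (j + 1) PySem.Dict.empty = PySem.Dict.empty := by
        rw [agetD_eq_toList, Array.toList_replicate, List.getD_eq_getElem?_getD, List.getElem?_replicate]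
        split <;> rfl
      rw [hrep]
      refine ⟨by simp [PySem.Dict.keys_empty], ?_, ?_⟩
      · intro s; rw [cnt_nil_succ]; simp [PySem.Dict.getD_empty]
      · intro s; rw [cnt_nil_succ]; simp [PySem.Dict.keys_empty]

-- A's counting loop is Counter(sums)
theorem counts_eq_counter (combos : List (List Int)) :
    combos.foldl (fun d entry =>
        if d.contains entry.sum = false then d.insert entry.sum 1
        else d.insert entry.sum (d.getD entry.sum 0 + 1)) (PySem.Dict.empty : PySem.Dict Int Int)
      = PySem.Dict.counter (combos.map List.sum) := by
  rw [← PySem.Dict.foldl_insert_getD_add_one_eq_counter, List.foldl_map]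
  apply PySem.List.foldl_congr_mem
  intro d c _
  by_cases h : d.contains c.sum
  · simp [h]
  · rw [Bool.not_eq_true] at h
    rw [if_pos h, PySem.Dict.getD_of_not_contains d 0 h]
    norm_num

theorem count_eq_cnt (l : List Int) (k : Nat) (s : Int) :
    ((PySem.List.combinations l k).map List.sum).count s = cnt l k s := by
  rw [List.count_eq_countP, List.countP_map]
  rfl

-- sum over pairs with multiplicity 1, as a filtered key list
theorem filter_map_pair_keys (ks : List Int) (v : Int → Int) :
    (((ks.map (fun t => (t, v t))).filter (fun p => p.2 == 1)).map (·.1))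
      = ks.filter (fun t => v t == 1) := by
  induction ks with
  | nil => rfl
  | cons a t ih => cases h : (v a == 1) <;> simp [h, ih]

-- ===== VERDICT (by name: the statement is the Claim_ definition above) =====
theorem eulerSum_spec : Claim_equal_eulerSum := by
  intro inputSet setLength subsetSize _ _
  unfold Spec_eulerSum
  by_cases hbig : (inputSet.length : Int) < subsetSize
  · have hlt : inputSet.length < subsetSize.toNat := by omega
    simp only [eulerSum, eulerSum_alt, if_pos hbig]
    rw [PySem.List.combinations_eq_nil_of_length_lt inputSet hlt]
    rfl
  simp only [eulerSum, eulerSum_alt, if_neg hbig]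
  rw [counts_eq_counter, PySem.Dict.items_counter,
    PySem.List.foldl_append_if (p := fun n : Int × Int => n.2 == 1) (f := fun n : Int × Int => n.1),
    List.nil_append, filter_map_pair_keys]
  have hinv := DPInv_foldl subsetSize.toNat inputSet []
    ((Array.replicate (subsetSize.toNat + 1) (PySem.Dict.empty : PySem.Dict Int Int)).setIfInBounds 0 (PySem.Dict.empty.insert 0 1))
    (DPInv_init subsetSize.toNat)
  rw [List.nil_append] at hinv
  obtain ⟨hlen, hj⟩ := hinv
  obtain ⟨hnd, hgd, hmem⟩ := hj subsetSize.toNat (le_refl _)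
  rw [PySem.Dict.items_eq_map_keys _ hnd 0,
    PySem.List.foldl_if_eq_foldl_filter (p := fun p : Int × Int => p.2 == 1) (f := fun acc (p : Int × Int) => acc + p.1),
    PySem.List.foldl_add (g := fun p : Int × Int => p.1), zero_add, filter_map_pair_keys]
  apply List.Perm.sum_eq
  rw [List.perm_ext_iff_of_nodup (List.Nodup.filter _ (PySem.Set.nodup_ofList _)) (List.Nodup.filter _ hnd)]
  intro a
  have hms : ∀ b : Int, b ∈ (PySem.List.combinations inputSet subsetSize.toNat).map List.sum ↔
      cnt inputSet subsetSize.toNat b ≠ 0 := by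
    intro b
    rw [← count_eq_cnt]
    constructor
    · intro h; exact (List.count_pos_iff.mpr h).ne'
    · intro h; exact List.count_pos_iff.mp (Nat.pos_of_ne_zero h)
  simp only [List.mem_filter, PySem.Set.mem_ofList, hms, hmem, hgd, count_eq_cnt]
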